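-- pv_equiv track=rewrite | github.com/sarvar2003/Algorithms | CompetitiveProgramming/CodeForces/timeToTypeString.py | solve
-- ===== SOURCE A (Python) =====
-- from collections import defaultdict
--
-- def solve(keyboard, text):
--     keyboardIndex = defaultdict()
--
--     for i in range(len(keyboard)):
--         keyboardIndex[keyboard[i]] = i
--
--     position = 0
--     time = 0
--
--     for char in text:
--         time += abs(keyboardIndex[char]-position)
--         position = keyboardIndex[char]
--
--     return time
-- ===== SOURCE B (Python) =====
-- def solve(keyboard, text):
--     index = {c: i for i, c in enumerate(keyboard)}
--     diff = [0] * (len(keyboard) + 1)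
--     prev = 0
--     for c in text:
--         cur = index[c]
--         lo, hi = (prev, cur) if prev <= cur else (cur, prev)
--         diff[lo] += 1
--         diff[hi] -= 1
--         prev = cur
--     total = 0
--     crossing = 0
--     for d in diff:
--         crossing += d
--         total += crossing
--     return total
-- ===== Notes on version B (the rewrite author's own statement) =====
-- stated objective: alternative
-- what changed: B counts, for every unit gap between adjacent keyboard slots, how many cursor moves cross that gap (a difference array updated per move, then a prefix-sum sweep over the gaps), instead of A's running sum of absolute index differences; the total crossings equal the total travel time.
-- outside the precondition, e.g. on solve('ab', 'zb'): A raises KeyError, B raises KeyError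
import Mathlib
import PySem

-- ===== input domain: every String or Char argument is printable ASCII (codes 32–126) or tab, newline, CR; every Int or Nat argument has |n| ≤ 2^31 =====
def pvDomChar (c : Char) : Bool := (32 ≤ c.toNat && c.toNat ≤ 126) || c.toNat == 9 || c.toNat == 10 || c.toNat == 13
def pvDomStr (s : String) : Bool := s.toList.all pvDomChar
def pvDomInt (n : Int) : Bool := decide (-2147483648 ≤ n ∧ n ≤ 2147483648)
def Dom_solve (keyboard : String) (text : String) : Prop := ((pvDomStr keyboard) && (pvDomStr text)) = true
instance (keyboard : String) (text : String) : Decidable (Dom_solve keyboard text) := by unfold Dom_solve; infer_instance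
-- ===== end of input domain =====

-- B replaces A's running |index difference| accumulator by a gap-crossing count:
-- a difference array marks each move's interval, and a prefix-sum sweep totals,
-- for every unit gap of the keyboard, the number of moves crossing it (objective: alternative).

-- ===== PORT A =====
-- keyboardIndex[char] raises KeyError for chars not on the keyboard — those inputs are
-- outside Pre_solve, so the getD default is never reached on admitted inputs.
def solve (keyboard : String) (text : String) : Int :=
  let kb := keyboard.toList
  let d : PySem.Dict Char Int :=
    (PySem.List.pyRange 0 (kb.length : Int) 1).foldl
      (fun d i => PySem.Dict.insert d (PySem.List.pyGetD kb i ' ') i) PySem.Dict.empty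
  let r := text.toList.foldl
    (fun (pt : Int × Int) char =>
      ((d.get? char).getD 0, pt.2 + |(d.get? char).getD 0 - pt.1|))
    (0, 0)
  r.2

-- ===== PORT B =====
-- diff[lo] += 1 / diff[hi] -= 1 ported with pyGetD/pySetD; under Pre_solve both
-- indices are dict values in [0, len(keyboard)), hence in range, so pySetD is exact.
def solve_alt (keyboard : String) (text : String) : Int :=
  let d : PySem.Dict Char Int :=
    (PySem.List.enumerate keyboard.toList).foldl (fun d ic => PySem.Dict.insert d ic.2 ic.1) PySem.Dict.empty
  let diff0 : List Int := List.replicate (keyboard.toList.length + 1) 0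
  let r := text.toList.foldl
    (fun (st : List Int × Int) c =>
      let cur := (d.get? c).getD 0
      let lo := if st.2 ≤ cur then st.2 else cur
      let hi := if st.2 ≤ cur then cur else st.2
      let diff1 := PySem.List.pySetD st.1 lo (PySem.List.pyGetD st.1 lo 0 + 1)
      let diff2 := PySem.List.pySetD diff1 hi (PySem.List.pyGetD diff1 hi 0 - 1)
      (diff2, cur))
    (diff0, 0)
  (r.1.foldl (fun (ct : Int × Int) dv => (ct.1 + dv, ct.2 + (ct.1 + dv))) (0, 0)).2

-- ===== PRECONDITION & SPEC =====
-- Pre_ excludes inputs where some text character is absent from keyboard: there Python A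
-- (and Python B alike) raise KeyError.
def Pre_solve (keyboard : String) (text : String) : Prop :=
  (text.toList.all (fun c => keyboard.toList.contains c)) = true
instance (keyboard : String) (text : String) : Decidable (Pre_solve keyboard text) := by
  unfold Pre_solve; infer_instance
def pvWitness_solve : String × String := ("ab", "ab")
def Spec_solve (keyboard : String) (text : String) (out : Int) : Prop := out = solve_alt keyboard text
instance (keyboard : String) (text : String) (out : Int) : Decidable (Spec_solve keyboard text out) := by unfold Spec_solve; infer_instance

-- ===== CLAIM (what is proved, stated in full; the proofs are below) =====
def Claim_equal_solve : Prop := ∀ (keyboard : String) (text : String), Dom_solve keyboard text → Pre_solve keyboard text → Spec_solve keyboard text (solve keyboard text)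

-- ===== LEMMAS AND PROOFS =====

-- Weighted sum of a difference array: entry at index j counts, with multiplicity,
-- every gap from j on, so it weighs (length - j).
def pvWsum : List Int → Int
  | [] => 0
  | d :: ds => d * ((ds.length : Int) + 1) + pvWsum ds

theorem pvWsum_replicate (n : Nat) : pvWsum (List.replicate n 0) = 0 := by
  induction n with
  | zero => rfl
  | succ n ih => simp [List.replicate_succ, pvWsum, ih]

-- Adding v at index n < length changes the weighted sum by v * (length - n).
theorem pvWsum_bump : ∀ (l : List Int) (n : Nat) (v : Int), n < l.length →
    pvWsum (l.set n (l.getD n 0 + v)) = pvWsum l + v * ((l.length : Int) - (n : Int)) := by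
  intro l
  induction l with
  | nil => intro n v h; simp at h
  | cons d ds ih =>
    intro n v h
    cases n with
    | zero => simp [pvWsum]; ring
    | succ n =>
      simp only [List.set_cons_succ, List.getD_cons_succ, pvWsum, List.length_set]
      rw [ih n v (by simpa using h)]
      simp only [List.length_cons]
      push_cast
      ring

-- B's prefix-sum sweep over the difference array equals its weighted sum.
theorem pv_scan : ∀ (ds : List Int) (c t : Int),
    (ds.foldl (fun (ct : Int × Int) dv => (ct.1 + dv, ct.2 + (ct.1 + dv))) (c, t)).2
    = t + c * (ds.length : Int) + pvWsum ds := by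
  intro ds
  induction ds with
  | nil => intro c t; simp [pvWsum]
  | cons d ds ih =>
    intro c t
    simp only [List.foldl_cons, pvWsum, List.length_cons]
    rw [ih]
    push_cast
    ring

-- The two dict builds fold the same (index, char) pairs in the same order.
theorem pv_dict_eq (kb : List Char) :
    (PySem.List.pyRange 0 (kb.length : Int) 1).foldl
      (fun d i => PySem.Dict.insert d (PySem.List.pyGetD kb i ' ') i) (PySem.Dict.empty : PySem.Dict Char Int)
    = (PySem.List.enumerate kb).foldl (fun d ic => PySem.Dict.insert d ic.2 ic.1) PySem.Dict.empty := by
  rw [PySem.List.enumerate_eq_map_pyRange (d := ' '), List.foldl_map]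
  simp

-- Every lookup that hits a key inserted by the fold returns a value with the folded-in property.
theorem pv_fold_get (P : Int → Prop) :
    ∀ (ps : List (Int × Char)) (d0 : PySem.Dict Char Int) (c : Char),
    (∀ p ∈ ps, P p.1) →
    ((∃ p ∈ ps, p.2 = c) ∨ (∃ v, d0.get? c = some v ∧ P v)) →
    ∃ v, (ps.foldl (fun d ic => PySem.Dict.insert d ic.2 ic.1) d0).get? c = some v ∧ P v := by
  intro ps
  induction ps with
  | nil =>
    intro d0 c _ h
    rcases h with ⟨p, hp, _⟩ | h
    · simp at hp
    · simpa using h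
  | cons p ps ih =>
    intro d0 c hP h
    simp only [List.foldl_cons]
    apply ih
    · intro q hq; exact hP q (List.mem_cons_of_mem _ hq)
    · by_cases htail : ∃ q ∈ ps, q.2 = c
      · exact Or.inl htail
      · refine Or.inr ?_
        by_cases hc : c = p.2
        · subst hc
          exact ⟨p.1, PySem.Dict.get?_insert_self _ _ _, hP p (List.mem_cons_self)⟩
        · rcases h with ⟨q, hq, hqc⟩ | ⟨v, hv, hPv⟩
          · rcases List.mem_cons.mp hq with rfl | hq'
            · exact absurd hqc.symm hc
            · exact absurd ⟨q, hq', hqc⟩ htail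
          · exact ⟨v, by rw [PySem.Dict.get?_insert_of_ne _ _ hc]; exact hv, hPv⟩

-- For every character of the keyboard, the dict holds an index in [0, |keyboard|).
theorem pv_dict_bound (kb : List Char) (c : Char) (hc : c ∈ kb) :
    ∃ v, ((PySem.List.enumerate kb).foldl (fun d ic => PySem.Dict.insert d ic.2 ic.1)
        (PySem.Dict.empty : PySem.Dict Char Int)).get? c = some v ∧ (0 ≤ v ∧ v < (kb.length : Int)) := by
  apply pv_fold_get (fun v => 0 ≤ v ∧ v < (kb.length : Int))
  · intro p hp
    rw [PySem.List.enumerate_eq_map_pyRange (d := ' ')] at hp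
    rcases List.mem_map.mp hp with ⟨j, hj, rfl⟩
    have := PySem.List.mem_pyRange_one.mp hj
    simpa [PySem.List.len] using this
  · left
    rcases List.mem_iff_getElem.mp hc with ⟨n, hn, hv⟩
    refine ⟨((n : Int), c), ?_, rfl⟩
    rw [PySem.List.enumerate_eq_map_pyRange (d := ' ')]
    apply List.mem_map.mpr
    refine ⟨(n : Int), ?_, ?_⟩
    · rw [PySem.List.mem_pyRange_one]
      constructor
      · exact Int.natCast_nonneg n
      · simpa [PySem.List.len] using Int.ofNat_lt.mpr hn
    · rw [PySem.List.pyGetD_eq_getElem _ _ (Int.natCast_nonneg n) (by simpa using Int.ofNat_lt.mpr hn)]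
      simp [hv]

-- The move loop: B's difference-array updates grow the weighted sum by exactly
-- A's running travel time.
theorem pv_loop (idx : Char → Int) :
    ∀ (cs : List Char) (diff : List Int) (prev t : Int),
    (∀ c ∈ cs, 0 ≤ idx c ∧ idx c < (diff.length : Int)) →
    0 ≤ prev → prev < (diff.length : Int) →
    (cs.foldl
      (fun (st : List Int × Int) c =>
        let cur := idx c
        let lo := if st.2 ≤ cur then st.2 else cur
        let hi := if st.2 ≤ cur then cur else st.2
        let diff1 := PySem.List.pySetD st.1 lo (PySem.List.pyGetD st.1 lo 0 + 1)
        let diff2 := PySem.List.pySetD diff1 hi (PySem.List.pyGetD diff1 hi 0 - 1)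
        (diff2, cur)) (diff, prev)).1.length = diff.length ∧
    pvWsum (cs.foldl
      (fun (st : List Int × Int) c =>
        let cur := idx c
        let lo := if st.2 ≤ cur then st.2 else cur
        let hi := if st.2 ≤ cur then cur else st.2
        let diff1 := PySem.List.pySetD st.1 lo (PySem.List.pyGetD st.1 lo 0 + 1)
        let diff2 := PySem.List.pySetD diff1 hi (PySem.List.pyGetD diff1 hi 0 - 1)
        (diff2, cur)) (diff, prev)).1
      = pvWsum diff +
        ((cs.foldl (fun (pt : Int × Int) c => (idx c, pt.2 + |idx c - pt.1|)) (prev, t)).2 - t) := by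
  intro cs
  induction cs with
  | nil => intro diff prev t _ _ _; simp
  | cons c cs ih =>
    intro diff prev t hb hp0 hp1
    have hc := hb c (List.mem_cons_self)
    simp only [List.foldl_cons]
    set cur := idx c with hcur
    set lo : Int := if prev ≤ cur then prev else cur with hlo
    set hi : Int := if prev ≤ cur then cur else prev with hhi
    have hlo0 : 0 ≤ lo := by rw [hlo]; split <;> [exact hp0; exact hc.1]
    have hhi0 : 0 ≤ hi := by rw [hhi]; split <;> [exact hc.1; exact hp0]
    have hlo1 : lo < (diff.length : Int) := by rw [hlo]; split <;> [exact hp1; exact hc.2]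
    have hhi1 : hi < (diff.length : Int) := by rw [hhi]; split <;> [exact hc.2; exact hp1]
    have hloN : lo.toNat < diff.length := by omega
    have hhiN : hi.toNat < diff.length := by omega
    rw [PySem.List.pySetD_of_nonneg _ _ hlo0, PySem.List.pyGetD_of_nonneg _ _ hlo0]
    set diff1 := diff.set lo.toNat (diff.getD lo.toNat 0 + 1) with hdiff1
    have hlen1 : diff1.length = diff.length := by rw [hdiff1, List.length_set]
    rw [PySem.List.pySetD_of_nonneg _ _ hhi0, PySem.List.pyGetD_of_nonneg _ _ hhi0]
    have hsub : diff1.getD hi.toNat 0 - 1 = diff1.getD hi.toNat 0 + (-1) := by ring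
    rw [hsub]
    set diff2 := diff1.set hi.toNat (diff1.getD hi.toNat 0 + (-1)) with hdiff2
    have hlen2 : diff2.length = diff.length := by rw [hdiff2, List.length_set, hlen1]
    have hws1 : pvWsum diff1 = pvWsum diff + 1 * ((diff.length : Int) - (lo.toNat : Int)) :=
      pvWsum_bump diff lo.toNat 1 hloN
    have hws2 : pvWsum diff2 = pvWsum diff1 + (-1) * ((diff.length : Int) - (hi.toNat : Int)) := by
      have h := pvWsum_bump diff1 hi.toNat (-1) (by rw [hlen1]; exact hhiN)
      rwa [hlen1] at h
    have hws : pvWsum diff2 = pvWsum diff + |cur - prev| := by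
      rw [hws2, hws1]
      have h1 : (lo.toNat : Int) = lo := by omega
      have h2 : (hi.toNat : Int) = hi := by omega
      rw [h1, h2]
      have habs : |cur - prev| = hi - lo := by
        rw [hhi, hlo]
        by_cases h : prev ≤ cur
        · rw [if_pos h, if_pos h, abs_of_nonneg (by omega)]
        · rw [if_neg h, if_neg h, abs_of_nonpos (by omega)]; ring
      rw [habs]; ring
    have ihres := ih diff2 cur (t + |cur - prev|)
      (by rw [hlen2]; intro c' hc'; exact hb c' (List.mem_cons_of_mem _ hc'))
      hc.1 (by rw [hlen2]; exact hc.2)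
    refine ⟨by rw [ihres.1, hlen2], ?_⟩
    rw [ihres.2, hws]
    ring

-- ===== VERDICT (by name: the statement is the Claim_ definition above) =====
theorem solve_spec : Claim_equal_solve := by
  intro keyboard text _ hPre
  unfold Spec_solve solve solve_alt
  simp only [pv_dict_eq]
  set kb := keyboard.toList with hkb
  set d : PySem.Dict Char Int :=
    (PySem.List.enumerate kb).foldl (fun d ic => PySem.Dict.insert d ic.2 ic.1) PySem.Dict.empty with hd
  have hbound : ∀ c ∈ text.toList, 0 ≤ (d.get? c).getD 0 ∧
      (d.get? c).getD 0 < ((List.replicate (kb.length + 1) (0:Int)).length : Int) := by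
    intro c hc
    have hmem : c ∈ kb := by
      have := List.all_eq_true.mp hPre c hc
      simpa using this
    rcases pv_dict_bound kb c hmem with ⟨v, hv, h0, h1⟩
    rw [← hd] at hv
    rw [hv]
    simp only [Option.getD_some, List.length_replicate]
    exact ⟨h0, by push_cast; omega⟩
  have hloop := pv_loop (fun c => (d.get? c).getD 0) text.toList
    (List.replicate (kb.length + 1) 0) 0 0 hbound le_rfl
    (by simp only [List.length_replicate]; push_cast; omega)
  rw [pv_scan]
  rw [hloop.1, hloop.2]
  simp [pvWsum_replicate]
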